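-- pv_equiv track=rewrite | github.com/a01707324/DisenioAgentesInteligentes1 | Inciso5-Laberinto.py | encontrar_posicion
-- ===== SOURCE A (Python) =====
-- def encontrar_posicion(laberinto):
--     inicio = None
--     final = None
--     for fila in range(len(laberinto)):
--         for columna in range(len(laberinto[fila])):
--             if laberinto[fila][columna] == "O":
--                 inicio = (fila, columna)
--             elif laberinto[fila][columna] == "X":
--                 final = (fila, columna)
--     return inicio, final
-- ===== SOURCE B (Python) =====
-- def encontrar_posicion(laberinto):
--     inicio = None
--     final = None
--     for fila in range(len(laberinto) - 1, -1, -1):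
--         row = laberinto[fila]
--         for columna in range(len(row) - 1, -1, -1):
--             c = row[columna]
--             if inicio is None and c == "O":
--                 inicio = (fila, columna)
--             elif final is None and c == "X":
--                 final = (fila, columna)
--             if inicio is not None and final is not None:
--                 break
--         if inicio is not None and final is not None:
--             break
--     return inicio, final
-- ===== Notes on version B (the rewrite author's own statement) =====
-- stated objective: alternative
-- what changed: B scans the grid backwards and records the first 'O'/'X' it meets, breaking out as soon as both are found, instead of A's full forward scan that keeps overwriting; the first reverse hit equals A's last forward occurrence.
import Mathlib
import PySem

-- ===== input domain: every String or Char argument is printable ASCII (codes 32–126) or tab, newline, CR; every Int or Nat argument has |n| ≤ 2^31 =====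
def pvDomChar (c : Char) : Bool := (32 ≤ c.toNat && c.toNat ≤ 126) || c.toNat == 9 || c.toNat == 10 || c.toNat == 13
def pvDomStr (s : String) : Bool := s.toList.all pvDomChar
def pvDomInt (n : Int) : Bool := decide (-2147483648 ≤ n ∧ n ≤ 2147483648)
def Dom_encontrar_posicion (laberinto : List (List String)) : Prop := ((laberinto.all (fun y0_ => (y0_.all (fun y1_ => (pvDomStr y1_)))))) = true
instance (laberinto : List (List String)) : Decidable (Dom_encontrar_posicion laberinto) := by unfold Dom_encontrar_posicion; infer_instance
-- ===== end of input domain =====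

-- B scans the grid backwards with early exit once both markers are found; A scans forward overwriting.
-- Equivalence of the RETURN value is proved for all inputs (both programs are total).

-- ===== PORT A =====
-- A: forward nested loops, later occurrences overwrite earlier ones.
def encontrar_posicion (laberinto : List (List String)) : (Option (Int × Int)) × (Option (Int × Int)) :=
  (PySem.List.enumerate laberinto 0).foldl
    (fun st fr =>
      (PySem.List.enumerate fr.2 0).foldl
        (fun st2 cc =>
          if cc.2 = "O" then (some (fr.1, cc.1), st2.2)
          else if cc.2 = "X" then (st2.1, some (fr.1, cc.1))
          else st2)
        st)
    (none, none)

-- ===== PORT B =====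
-- the cells of one row in reverse column order (Source B's inner loop ranges backwards)
def pvCellsRev (fila : Int) (row : List String) : List ((Int × Int) × String) :=
  ((PySem.List.enumerate row 0).map (fun cc => ((fila, cc.1), cc.2))).reverse

-- Source B's inner loop: record first hits, break when both found
def pvScanCell : List ((Int × Int) × String) → Option (Int × Int) → Option (Int × Int) →
    (Option (Int × Int)) × (Option (Int × Int))
  | [], i, f => (i, f)
  | (p, c) :: rest, i, f =>
    let st :=
      if i = none ∧ c = "O" then (some p, f)
      else if f = none ∧ c = "X" then (i, some p)
      else (i, f)
    if st.1 ≠ none ∧ st.2 ≠ none then st else pvScanCell rest st.1 st.2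

-- Source B's outer loop over rows in reverse order, break when both found
def pvScanRow : List (Int × List String) → Option (Int × Int) → Option (Int × Int) →
    (Option (Int × Int)) × (Option (Int × Int))
  | [], i, f => (i, f)
  | (fila, row) :: rest, i, f =>
    let st := pvScanCell (pvCellsRev fila row) i f
    if st.1 ≠ none ∧ st.2 ≠ none then st else pvScanRow rest st.1 st.2

def encontrar_posicion_alt (laberinto : List (List String)) : (Option (Int × Int)) × (Option (Int × Int)) :=
  pvScanRow (PySem.List.enumerate laberinto 0).reverse none none

-- ===== PRECONDITION & SPEC =====
def Spec_encontrar_posicion (laberinto : List (List String)) (out : (Option (Int × Int)) × (Option (Int × Int))) : Prop := out = encontrar_posicion_alt laberinto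
instance (laberinto : List (List String)) (out : (Option (Int × Int)) × (Option (Int × Int))) : Decidable (Spec_encontrar_posicion laberinto out) := by unfold Spec_encontrar_posicion; infer_instance

-- ===== CLAIM (what is proved, stated in full; the proofs are below) =====
def Claim_equal_encontrar_posicion : Prop := ∀ (laberinto : List (List String)), Dom_encontrar_posicion laberinto → Spec_encontrar_posicion laberinto (encontrar_posicion laberinto)

-- ===== LEMMAS AND PROOFS =====

-- first position carrying "O" (resp. "X") in a cell list
def pvFirstO : List ((Int × Int) × String) → Option (Int × Int)
  | [] => none
  | (p, c) :: rest => if c = "O" then some p else pvFirstO rest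

def pvFirstX : List ((Int × Int) × String) → Option (Int × Int)
  | [] => none
  | (p, c) :: rest => if c = "X" then some p else pvFirstX rest

theorem pvFirstO_append (a b : List ((Int × Int) × String)) :
    pvFirstO (a ++ b) = (pvFirstO a).or (pvFirstO b) := by
  induction a with
  | nil => simp [pvFirstO]
  | cons hd tl ih =>
    obtain ⟨p, c⟩ := hd
    by_cases h : c = "O" <;> simp [pvFirstO, h, ih]

theorem pvFirstX_append (a b : List ((Int × Int) × String)) :
    pvFirstX (a ++ b) = (pvFirstX a).or (pvFirstX b) := by
  induction a with
  | nil => simp [pvFirstX]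
  | cons hd tl ih =>
    obtain ⟨p, c⟩ := hd
    by_cases h : c = "X" <;> simp [pvFirstX, h, ih]

-- closed form of Source B's inner loop (the break is sound: once both are some nothing changes)
theorem pvScanCell_eq (M : List ((Int × Int) × String)) :
    ∀ i f, pvScanCell M i f = (i.or (pvFirstO M), f.or (pvFirstX M)) := by
  induction M with
  | nil => intro i f; cases i <;> cases f <;> simp [pvScanCell, pvFirstO, pvFirstX]
  | cons hd rest ih =>
    intro i f
    obtain ⟨p, c⟩ := hd
    cases i <;> cases f <;>
      by_cases hO : c = "O" <;>
      by_cases hX : c = "X" <;>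
      simp_all [pvScanCell, pvFirstO, pvFirstX]

-- closed form of Source B's outer loop
theorem pvScanRow_eq (rows : List (Int × List String)) :
    ∀ i f, pvScanRow rows i f =
      (i.or (pvFirstO (rows.flatMap fun r => pvCellsRev r.1 r.2)),
       f.or (pvFirstX (rows.flatMap fun r => pvCellsRev r.1 r.2))) := by
  induction rows with
  | nil => intro i f; simp [pvScanRow, pvFirstO, pvFirstX]
  | cons hd rest ih =>
    intro i f
    obtain ⟨fila, row⟩ := hd
    show (let st := pvScanCell (pvCellsRev fila row) i f;
          if st.1 ≠ none ∧ st.2 ≠ none then st else pvScanRow rest st.1 st.2) = _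
    rw [List.flatMap_cons, pvFirstO_append, pvFirstX_append]
    simp only [pvScanCell_eq]
    by_cases h : (i.or (pvFirstO (pvCellsRev fila row)) ≠ none ∧
                  f.or (pvFirstX (pvCellsRev fila row)) ≠ none)
    · obtain ⟨h1, h2⟩ := h
      simp only [ih]
      cases hi : i.or (pvFirstO (pvCellsRev fila row)) with
      | none => exact absurd hi h1
      | some vi =>
        cases hf : f.or (pvFirstX (pvCellsRev fila row)) with
        | none => exact absurd hf h2
        | some vf => simp [hi, hf, ← Option.or_assoc]
    · simp only [if_neg h, ih, Option.or_assoc]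

-- closed form of A's overwrite-fold: last occurrence = first occurrence in the reversed list
theorem pvFoldA_eq (M : List ((Int × Int) × String)) :
    ∀ st : (Option (Int × Int)) × (Option (Int × Int)),
      M.foldl (fun st2 pc =>
          if pc.2 = "O" then (some pc.1, st2.2)
          else if pc.2 = "X" then (st2.1, some pc.1)
          else st2) st
        = ((pvFirstO M.reverse).or st.1, (pvFirstX M.reverse).or st.2) := by
  induction M with
  | nil => intro st; simp [pvFirstO, pvFirstX]
  | cons hd rest ih =>
    intro st
    obtain ⟨p, c⟩ := hd
    rw [List.foldl_cons, ih, List.reverse_cons, pvFirstO_append, pvFirstX_append]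
    by_cases hO : c = "O" <;> by_cases hX : c = "X" <;>
      simp [pvFirstO, pvFirstX, hO, hX]

-- A's nested fold is the fold over the flattened cell list
theorem pvFoldA_nested (laberinto : List (List String)) :
    encontrar_posicion laberinto =
      ((PySem.List.enumerate laberinto 0).flatMap
          (fun r => (PySem.List.enumerate r.2 0).map (fun cc => ((r.1, cc.1), cc.2)))).foldl
        (fun st2 pc =>
          if pc.2 = "O" then (some pc.1, st2.2)
          else if pc.2 = "X" then (st2.1, some pc.1)
          else st2) (none, none) := by
  unfold encontrar_posicion
  generalize PySem.List.enumerate laberinto 0 = rows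
  generalize hst : ((none, none) : (Option (Int × Int)) × (Option (Int × Int))) = st
  clear hst
  induction rows generalizing st with
  | nil => simp
  | cons hd rest ih =>
    rw [List.foldl_cons, List.flatMap_cons, List.foldl_append, ih, List.foldl_map]

theorem encontrar_posicion_eq_alt (laberinto : List (List String)) :
    encontrar_posicion laberinto = encontrar_posicion_alt laberinto := by
  rw [pvFoldA_nested, pvFoldA_eq]
  unfold encontrar_posicion_alt
  rw [pvScanRow_eq]
  have hflat :
      ((PySem.List.enumerate laberinto 0).flatMap
          (fun r => (PySem.List.enumerate r.2 0).map (fun cc => ((r.1, cc.1), cc.2)))).reverse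
        = (PySem.List.enumerate laberinto 0).reverse.flatMap (fun r => pvCellsRev r.1 r.2) := by
    rw [List.reverse_flatMap]
    rfl
  rw [hflat]
  simp

-- ===== VERDICT (by name: the statement is the Claim_ definition above) =====
theorem encontrar_posicion_spec : Claim_equal_encontrar_posicion := by
  intro laberinto _
  unfold Spec_encontrar_posicion
  exact encontrar_posicion_eq_alt laberinto
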